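-- pv_equiv track=rewrite | github.com/asaadco/ICS381-Projects | Project2_NQueens/NQueens.py | returnConflicts
-- ===== SOURCE A (Python) =====
-- def returnConflicts(gameMap):
--     n = len(gameMap)
--     c = [[0 for N in range(n)] for N in range(n)]
--     for i in range(n):
--         for j in range(n):
--
--             for k in range(0, n):
--                 if(gameMap[i][k]==1):
--                     c[i][j] += 1        ## horiziontally
--                 if(gameMap[k][j]==1 and i != k):
--                     c[i][j] += 1
--             for k in range(1, n):
--                 if(i-k >= 0 and j + k < n):   ## (-, +)
--                     if gameMap[i-k][j+k] == 1:
--                         c[i][j] += 1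
--                 if i+k < n and j - k >= 0:
--                     if gameMap[i+k][j-k] == 1:
--                         c[i][j] += 1
--                 if i-k >= 0 and j-k >= 0:
--                     if gameMap[i-k][j-k] == 1:
--                         c[i][j] += 1
--                 if i+k < n and j+k < n:
--                     if gameMap[i+k][j+k] == 1:
--                         c[i][j] += 1
--     return c
-- ===== SOURCE B (Python) =====
-- def returnConflicts(gameMap):
--     n = len(gameMap)
--     rows = [sum(1 for k in range(n) if gameMap[i][k] == 1) for i in range(n)]
--     cols = [sum(1 for k in range(n) if gameMap[k][j] == 1) for j in range(n)]
--     diag = [sum(1 for r in range(n) if 0 <= r - d + (n - 1) < n and gameMap[r][r - d + (n - 1)] == 1)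
--             for d in range(2 * n - 1)]
--     anti = [sum(1 for r in range(n) if 0 <= s - r < n and gameMap[r][s - r] == 1)
--             for s in range(2 * n - 1)]
--     return [[rows[i] + cols[j] + diag[i - j + n - 1] + anti[i + j]
--              - 3 * (1 if gameMap[i][j] == 1 else 0)
--              for j in range(n)] for i in range(n)]
-- ===== Notes on version B (the rewrite author's own statement) =====
-- stated objective: faster
-- what changed: A rescans the whole row, column and four diagonal directions for every cell (O(n) per cell); B precomputes per-row, per-column, per-diagonal and per-anti-diagonal 1-counts once and combines four table lookups minus three centre corrections per cell.
import Mathlib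
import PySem

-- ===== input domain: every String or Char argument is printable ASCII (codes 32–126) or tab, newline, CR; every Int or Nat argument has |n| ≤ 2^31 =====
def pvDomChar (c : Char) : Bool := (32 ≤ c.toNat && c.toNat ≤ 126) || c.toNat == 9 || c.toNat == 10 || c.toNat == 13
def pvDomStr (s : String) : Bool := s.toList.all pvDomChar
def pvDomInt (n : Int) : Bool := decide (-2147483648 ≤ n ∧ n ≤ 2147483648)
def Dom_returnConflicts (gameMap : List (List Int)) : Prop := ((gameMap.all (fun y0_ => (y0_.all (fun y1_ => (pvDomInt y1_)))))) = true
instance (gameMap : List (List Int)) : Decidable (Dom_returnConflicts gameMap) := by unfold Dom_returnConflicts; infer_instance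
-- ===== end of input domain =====

-- B replaces A's O(n) scans per cell by precomputed row/column/diagonal/anti-diagonal
-- 1-counts, making each output cell O(1); measured faster at large sizes (asymptotic O(n^3) → O(n^2)).

-- shared indexing helper: gameMap[i][j] (both Pythons only index with 0 ≤ index < len, guaranteed by Pre_)
def pvGet (g : List (List Int)) (i j : Int) : Int :=
  PySem.List.pyGetD (PySem.List.pyGetD g i []) j 0

-- ===== PORT A =====
def returnConflicts (gameMap : List (List Int)) : List (List Int) :=
  let n : Int := (gameMap.length : Int)
  (PySem.List.pyRange 0 n 1).map (fun i =>
    (PySem.List.pyRange 0 n 1).map (fun j =>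
      -- c[i][j] starts at 0; first k-loop: row i and column j (column skips row i)
      let c1 := (PySem.List.pyRange 0 n 1).foldl (fun c k =>
        let c := if pvGet gameMap i k == 1 then c + 1 else c
        let c := if pvGet gameMap k j == 1 ∧ ¬ i = k then c + 1 else c
        c) 0
      -- second k-loop: the four diagonal directions at offset k
      (PySem.List.pyRange 1 n 1).foldl (fun c k =>
        let c := if 0 ≤ i - k ∧ j + k < n then
                   (if pvGet gameMap (i - k) (j + k) == 1 then c + 1 else c) else c
        let c := if i + k < n ∧ 0 ≤ j - k then
                   (if pvGet gameMap (i + k) (j - k) == 1 then c + 1 else c) else c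
        let c := if 0 ≤ i - k ∧ 0 ≤ j - k then
                   (if pvGet gameMap (i - k) (j - k) == 1 then c + 1 else c) else c
        let c := if i + k < n ∧ j + k < n then
                   (if pvGet gameMap (i + k) (j + k) == 1 then c + 1 else c) else c
        c) c1))

-- ===== PORT B =====
def returnConflicts_alt (gameMap : List (List Int)) : List (List Int) :=
  let n : Int := (gameMap.length : Int)
  let rows := (PySem.List.pyRange 0 n 1).map (fun i =>
    ((PySem.List.pyRange 0 n 1).map (fun k =>
      if pvGet gameMap i k == 1 then (1 : Int) else 0)).sum)
  let cols := (PySem.List.pyRange 0 n 1).map (fun j =>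
    ((PySem.List.pyRange 0 n 1).map (fun k =>
      if pvGet gameMap k j == 1 then (1 : Int) else 0)).sum)
  let diag := (PySem.List.pyRange 0 (2*n - 1) 1).map (fun d =>
    ((PySem.List.pyRange 0 n 1).map (fun r =>
      if 0 ≤ r - d + (n - 1) ∧ r - d + (n - 1) < n ∧ pvGet gameMap r (r - d + (n - 1)) == 1
      then (1 : Int) else 0)).sum)
  let anti := (PySem.List.pyRange 0 (2*n - 1) 1).map (fun s =>
    ((PySem.List.pyRange 0 n 1).map (fun r =>
      if 0 ≤ s - r ∧ s - r < n ∧ pvGet gameMap r (s - r) == 1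
      then (1 : Int) else 0)).sum)
  (PySem.List.pyRange 0 n 1).map (fun i =>
    (PySem.List.pyRange 0 n 1).map (fun j =>
      PySem.List.pyGetD rows i 0 + PySem.List.pyGetD cols j 0
        + PySem.List.pyGetD diag (i - j + n - 1) 0 + PySem.List.pyGetD anti (i + j) 0
        - 3 * (if pvGet gameMap i j == 1 then (1 : Int) else 0)))

-- ===== PRECONDITION & SPEC =====
-- Pre_ excludes exactly the ragged boards (a row shorter than len(gameMap)) on which
-- Python A raises IndexError; on square-or-wider boards every index is in range.
def Pre_returnConflicts (gameMap : List (List Int)) : Prop :=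
  ∀ row ∈ gameMap, gameMap.length ≤ row.length
instance (gameMap : List (List Int)) : Decidable (Pre_returnConflicts gameMap) := by
  unfold Pre_returnConflicts; infer_instance
def pvWitness_returnConflicts : List (List Int) := [[0, 1], [1, 0]]

def Spec_returnConflicts (gameMap : List (List Int)) (out : List (List Int)) : Prop := out = returnConflicts_alt gameMap
instance (gameMap : List (List Int)) (out : List (List Int)) : Decidable (Spec_returnConflicts gameMap out) := by unfold Spec_returnConflicts; infer_instance

-- ===== CLAIM (what is proved, stated in full; the proofs are below) =====
def Claim_equal_returnConflicts : Prop := ∀ (gameMap : List (List Int)), Dom_returnConflicts gameMap → Pre_returnConflicts gameMap → Spec_returnConflicts gameMap (returnConflicts gameMap)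

-- ===== LEMMAS AND PROOFS =====

-- 0/1 indicator of a queen at (r,c)
def pvX (g : List (List Int)) (r c : Int) : Int :=
  if pvGet g r c == 1 then 1 else 0

-- main-diagonal / anti-diagonal indicator of the cell in row r on the line through (i,j), 0 off the board
def pvF (g : List (List Int)) (n i j r : Int) : Int :=
  if 0 ≤ r ∧ r < n ∧ 0 ≤ r - i + j ∧ r - i + j < n then pvX g r (r - i + j) else 0
def pvG (g : List (List Int)) (n i j r : Int) : Int :=
  if 0 ≤ r ∧ r < n ∧ 0 ≤ i + j - r ∧ i + j - r < n then pvX g r (i + j - r) else 0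

lemma sum_pyRange_eq_sum_Icc (f : Int → Int) (a b : Int) :
    ((PySem.List.pyRange a b 1).map f).sum = ∑ r ∈ Finset.Icc a (b - 1), f r := by
  generalize hm : (b - a).toNat = m
  induction m generalizing a with
  | zero =>
      rw [PySem.List.pyRange_one_eq_nil (by omega), Finset.Icc_eq_empty (by omega)]
      simp
  | succ m ih =>
      rw [PySem.List.pyRange_one_cons (by omega)]
      simp only [List.map_cons, List.sum_cons]
      rw [ih (a + 1) (by omega),
        Finset.Icc_eq_cons_Ioc (by omega : a ≤ b - 1), Finset.sum_cons,
        ← Finset.Icc_add_one_left_eq_Ioc]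

lemma sum_Icc_split (f : Int → Int) (a b c : Int) (h1 : a ≤ b) (h2 : b ≤ c) :
    ∑ r ∈ Finset.Icc a c, f r
      = (∑ r ∈ Finset.Icc a (b - 1), f r) + ∑ r ∈ Finset.Icc b c, f r := by
  have hdisj : Disjoint (Finset.Icc a (b - 1)) (Finset.Icc b c) := by
    rw [Finset.disjoint_left]
    intro x hx hx'
    simp only [Finset.mem_Icc] at hx hx'
    omega
  have hun : Finset.Icc a (b - 1) ∪ Finset.Icc b c = Finset.Icc a c := by
    ext r
    simp only [Finset.mem_union, Finset.mem_Icc]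
    omega
  rw [← hun, Finset.sum_union hdisj]

lemma sum_shift_down (m i : Int) (F : Int → Int) :
    ∑ k ∈ Finset.Icc 1 m, F (i - k) = ∑ r ∈ Finset.Icc (i - m) (i - 1), F r := by
  apply Finset.sum_nbij' (fun k => i - k) (fun r => i - r) <;>
    intros <;> simp_all [Finset.mem_Icc] <;> omega

lemma sum_shift_up (m i : Int) (F : Int → Int) :
    ∑ k ∈ Finset.Icc 1 m, F (i + k) = ∑ r ∈ Finset.Icc (i + 1) (i + m), F r := by
  apply Finset.sum_nbij' (fun k => i + k) (fun r => r - i) <;>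
    intros <;> simp_all [Finset.mem_Icc] <;> omega

-- the heart: summing a vanishing-off-the-board line function over offsets k=1..n-1 in both
-- directions from (i,j) is its full per-line sum minus the centre cell
lemma center_split (n i : Int) (hi0 : 0 ≤ i) (hin : i < n) (F : Int → Int)
    (hF : ∀ r, r < 0 ∨ n ≤ r → F r = 0) :
    ∑ k ∈ Finset.Icc 1 (n - 1), (F (i - k) + F (i + k))
      = (∑ r ∈ Finset.Icc 0 (n - 1), F r) - F i := by
  rw [Finset.sum_add_distrib, sum_shift_down, sum_shift_up]
  have hdown : ∑ r ∈ Finset.Icc (i - (n - 1)) (i - 1), F r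
      = ∑ r ∈ Finset.Icc 0 (i - 1), F r := by
    refine (Finset.sum_subset ?_ ?_).symm
    · intro r hr; simp only [Finset.mem_Icc] at *; omega
    · intro r hr hr'; simp only [Finset.mem_Icc] at hr hr'; exact hF r (by omega)
  have hup : ∑ r ∈ Finset.Icc (i + 1) (i + (n - 1)), F r
      = ∑ r ∈ Finset.Icc (i + 1) (n - 1), F r := by
    refine (Finset.sum_subset ?_ ?_).symm
    · intro r hr; simp only [Finset.mem_Icc] at *; omega
    · intro r hr hr'; simp only [Finset.mem_Icc] at hr hr'; exact hF r (by omega)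
  rw [hdown, hup, sum_Icc_split F 0 i (n - 1) hi0 (by omega),
    Finset.Icc_eq_cons_Ioc (by omega : i ≤ n - 1), Finset.sum_cons,
    ← Finset.Icc_add_one_left_eq_Ioc]
  ring

-- one conditional `c += 1` step as an addition (collapses A's let-chains linearly)
lemma condIncP (x : Int) (P : Prop) [Decidable P] :
    (if P then x + 1 else x) = x + (if P then (1 : Int) else 0) := by
  split_ifs <;> ring

lemma condInc (x : Int) (P : Prop) [Decidable P] (b : Bool) :
    (if P then (if b = true then x + 1 else x) else x)
      = x + (if P then (if b = true then (1 : Int) else 0) else 0) := by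
  split_ifs <;> ring

-- A's first inner loop is row-count(i) + column-count(j) minus the centre
lemma foldA1_eq (g : List (List Int)) (n i j : Int) (hi0 : 0 ≤ i) (hin : i < n) :
    ((PySem.List.pyRange 0 n 1).foldl (fun c k =>
        let c := if pvGet g i k == 1 then c + 1 else c
        let c := if pvGet g k j == 1 ∧ ¬ i = k then c + 1 else c
        c) 0)
      = (∑ k ∈ Finset.Icc 0 (n - 1), pvX g i k)
        + (∑ k ∈ Finset.Icc 0 (n - 1), pvX g k j) - pvX g i j := by
  have hb : (fun (c k : Int) =>
        let c := if pvGet g i k == 1 then c + 1 else c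
        let c := if pvGet g k j == 1 ∧ ¬ i = k then c + 1 else c
        c)
      = fun c k => c + ((if pvGet g i k == 1 then (1 : Int) else 0)
          + (if pvGet g k j == 1 ∧ ¬ i = k then (1 : Int) else 0)) := by
    funext c k
    simp only [condIncP]
    ring
  have hterm : ∀ k : Int, (if pvGet g k j == 1 ∧ ¬ i = k then (1 : Int) else 0)
      = pvX g k j - (if k = i then pvX g i j else 0) := by
    intro k
    by_cases hk : k = i
    · subst hk; simp [pvX]
    · simp [pvX, hk, Ne.symm hk]
  rw [hb, PySem.List.foldl_add, sum_pyRange_eq_sum_Icc]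
  simp only [hterm]
  rw [Finset.sum_add_distrib, Finset.sum_sub_distrib, Finset.sum_ite_eq']
  have : i ∈ Finset.Icc 0 (n - 1) := by simp only [Finset.mem_Icc]; omega
  rw [if_pos this]
  have hx : ∀ k ∈ Finset.Icc 0 (n - 1),
      (if pvGet g i k == 1 then (1 : Int) else 0) = pvX g i k := by
    intro k _
    simp [pvX]
  rw [Finset.sum_congr rfl hx]
  ring

-- A's second inner loop term, rewritten as the two line functions at offsets ±k
set_option maxHeartbeats 1000000 in
lemma foldA2_eq (g : List (List Int)) (n i j : Int) (c1 : Int)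
    (hi0 : 0 ≤ i) (hin : i < n) (hj0 : 0 ≤ j) (hjn : j < n) :
    ((PySem.List.pyRange 1 n 1).foldl (fun c k =>
        let c := if 0 ≤ i - k ∧ j + k < n then
                   (if pvGet g (i - k) (j + k) == 1 then c + 1 else c) else c
        let c := if i + k < n ∧ 0 ≤ j - k then
                   (if pvGet g (i + k) (j - k) == 1 then c + 1 else c) else c
        let c := if 0 ≤ i - k ∧ 0 ≤ j - k then
                   (if pvGet g (i - k) (j - k) == 1 then c + 1 else c) else c
        let c := if i + k < n ∧ j + k < n then
                   (if pvGet g (i + k) (j + k) == 1 then c + 1 else c) else c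
        c) c1)
      = c1 + ∑ k ∈ Finset.Icc 1 (n - 1),
          ((pvF g n i j (i - k) + pvF g n i j (i + k))
            + (pvG g n i j (i - k) + pvG g n i j (i + k))) := by
  have hb : (fun (c k : Int) =>
        let c := if 0 ≤ i - k ∧ j + k < n then
                   (if pvGet g (i - k) (j + k) == 1 then c + 1 else c) else c
        let c := if i + k < n ∧ 0 ≤ j - k then
                   (if pvGet g (i + k) (j - k) == 1 then c + 1 else c) else c
        let c := if 0 ≤ i - k ∧ 0 ≤ j - k then
                   (if pvGet g (i - k) (j - k) == 1 then c + 1 else c) else c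
        let c := if i + k < n ∧ j + k < n then
                   (if pvGet g (i + k) (j + k) == 1 then c + 1 else c) else c
        c)
      = fun c k => c
          + ((if 0 ≤ i - k ∧ j + k < n then (if pvGet g (i - k) (j + k) == 1 then (1:Int) else 0) else 0)
          + (if i + k < n ∧ 0 ≤ j - k then (if pvGet g (i + k) (j - k) == 1 then (1:Int) else 0) else 0)
          + (if 0 ≤ i - k ∧ 0 ≤ j - k then (if pvGet g (i - k) (j - k) == 1 then (1:Int) else 0) else 0)
          + (if i + k < n ∧ j + k < n then (if pvGet g (i + k) (j + k) == 1 then (1:Int) else 0) else 0)) := by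
    funext c k
    simp only [condInc]
    ring
  rw [hb, PySem.List.foldl_add, sum_pyRange_eq_sum_Icc]
  congr 1
  apply Finset.sum_congr rfl
  intro k hk
  simp only [Finset.mem_Icc] at hk
  simp only [pvF, pvG, pvX]
  have e1 : i - k - i + j = j - k := by ring
  have e2 : i + k - i + j = j + k := by ring
  have e3 : i + j - (i - k) = j + k := by ring
  have e4 : i + j - (i + k) = j - k := by ring
  rw [e1, e2, e3, e4]
  split_ifs <;> omega

-- B's diagonal-table entry at i-j+n-1 is the pvF line sum, and the anti one is pvG
lemma diag_entry_eq (g : List (List Int)) (n i j : Int) :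
    ((PySem.List.pyRange 0 n 1).map (fun r =>
        if 0 ≤ r - (i - j + n - 1) + (n - 1) ∧ r - (i - j + n - 1) + (n - 1) < n
            ∧ pvGet g r (r - (i - j + n - 1) + (n - 1)) == 1
        then (1 : Int) else 0)).sum
      = ∑ r ∈ Finset.Icc 0 (n - 1), pvF g n i j r := by
  rw [sum_pyRange_eq_sum_Icc]
  apply Finset.sum_congr rfl
  intro r hr
  simp only [Finset.mem_Icc] at hr
  have e : r - (i - j + n - 1) + (n - 1) = r - i + j := by ring
  rw [e]
  by_cases hb : pvGet g r (r - i + j) == 1 <;>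
    simp [pvF, pvX, hb] <;>
    (try split_ifs) <;> omega
lemma anti_entry_eq (g : List (List Int)) (n i j : Int) :
    ((PySem.List.pyRange 0 n 1).map (fun r =>
        if 0 ≤ (i + j) - r ∧ (i + j) - r < n ∧ pvGet g r ((i + j) - r) == 1
        then (1 : Int) else 0)).sum
      = ∑ r ∈ Finset.Icc 0 (n - 1), pvG g n i j r := by
  rw [sum_pyRange_eq_sum_Icc]
  apply Finset.sum_congr rfl
  intro r hr
  simp only [Finset.mem_Icc] at hr
  by_cases hb : pvGet g r (i + j - r) == 1 <;>
    simp [pvG, pvX, hb] <;>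
    (try split_ifs) <;> omega

-- ===== VERDICT (by name: the statement is the Claim_ definition above) =====
set_option maxHeartbeats 1000000 in
theorem returnConflicts_spec : Claim_equal_returnConflicts := by
  intro g _ _
  unfold Spec_returnConflicts returnConflicts returnConflicts_alt
  simp only []
  set n : Int := (g.length : Int) with hn
  apply List.map_congr_left
  intro i hi
  apply List.map_congr_left
  intro j hj
  rw [PySem.List.mem_pyRange_one] at hi hj
  -- B side: resolve the four table lookups
  rw [PySem.List.pyGetD_map_pyRange_of_nonneg _ n i 0 hi.1 hi.2,
    PySem.List.pyGetD_map_pyRange_of_nonneg _ n j 0 hj.1 hj.2,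
    PySem.List.pyGetD_map_pyRange_of_nonneg _ (2*n - 1) (i - j + n - 1) 0 (by omega) (by omega),
    PySem.List.pyGetD_map_pyRange_of_nonneg _ (2*n - 1) (i + j) 0 (by omega) (by omega)]
  -- A side: the two loops as sums
  rw [foldA1_eq g n i j hi.1 hi.2, foldA2_eq g n i j _ hi.1 hi.2 hj.1 hj.2]
  rw [Finset.sum_add_distrib,
    center_split n i hi.1 hi.2 (pvF g n i j) (by intro r hr; simp only [pvF]; split_ifs <;> omega),
    center_split n i hi.1 hi.2 (pvG g n i j) (by intro r hr; simp only [pvG]; split_ifs <;> omega)]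
  rw [diag_entry_eq g n i j, anti_entry_eq g n i j]
  -- row/column sums match definitionally after folding pvX; centre values
  have hFi : pvF g n i j i = pvX g i j := by
    simp only [pvF]; rw [if_pos (by omega)]; congr 1; ring
  have hGi : pvG g n i j i = pvX g i j := by
    simp only [pvG]; rw [if_pos (by omega)]; congr 1; ring
  rw [hFi, hGi]
  simp only [pvX]
  rw [sum_pyRange_eq_sum_Icc, sum_pyRange_eq_sum_Icc]
  ring
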